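-- pv_equiv track=rewrite | github.com/papos8/BeliefRevisionSimulation | Agent.py | wordlsRelationToOrder
-- ===== SOURCE A (Python) =====
-- def wordlsRelationToOrder(worldsRelation):
--     maxLen = 0
--     order = dict()
--     for key in worldsRelation.keys():
--         maxLen = max(maxLen, len(worldsRelation[key]))
--     for i in range(maxLen):
--         order.update({i: []})
--     for i in range(maxLen):
--         for state in worldsRelation:
--             if len(worldsRelation[state]) == i:
--                 order[i].append(state)
--     return order
-- ===== SOURCE B (Python) =====
-- def wordlsRelationToOrder(worldsRelation):
--     maxLen = max(map(len, worldsRelation.values()), default=0)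
--     buckets = [[] for _ in range(maxLen)]
--     for state, rel in worldsRelation.items():
--         if len(rel) < maxLen:
--             buckets[len(rel)].append(state)
--     return dict(enumerate(buckets))
-- ===== Notes on version B (the rewrite author's own statement) =====
-- stated objective: alternative
-- what changed: Replaces A's dict built by one full scan of the states per bucket index with a counting-sort-style list of buckets filled in a single pass over the items and turned into the result dict via enumerate.
import Mathlib
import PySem

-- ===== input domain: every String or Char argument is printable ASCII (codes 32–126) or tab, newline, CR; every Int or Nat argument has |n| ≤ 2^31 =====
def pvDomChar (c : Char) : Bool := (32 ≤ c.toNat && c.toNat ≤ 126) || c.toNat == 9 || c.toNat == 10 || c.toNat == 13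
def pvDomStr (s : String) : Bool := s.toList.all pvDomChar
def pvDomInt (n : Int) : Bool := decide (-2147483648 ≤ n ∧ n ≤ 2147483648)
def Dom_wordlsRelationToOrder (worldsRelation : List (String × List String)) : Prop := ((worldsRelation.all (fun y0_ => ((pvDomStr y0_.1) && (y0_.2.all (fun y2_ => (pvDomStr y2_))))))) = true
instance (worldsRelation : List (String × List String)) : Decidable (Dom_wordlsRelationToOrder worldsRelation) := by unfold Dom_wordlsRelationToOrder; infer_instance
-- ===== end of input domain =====

-- B replaces A's per-bucket-index full scans of the dict by a counting-sort-style list of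
-- buckets filled in one pass over the items (objective: alternative, single-pass grouping).

-- ===== PORT A =====
def wordlsRelationToOrder (worldsRelation : List (String × List String)) : List (Int × List String) :=
  -- maxLen = 0; for key in worldsRelation.keys(): maxLen = max(maxLen, len(worldsRelation[key]))
  let maxLen : Int := worldsRelation.foldl
    (fun m kv => max m (((PySem.Dict.mk worldsRelation).getD kv.1 []).length : Int)) 0
  -- order = dict(); for i in range(maxLen): order.update({i: []})
  let order : PySem.Dict Int (List String) :=
    (PySem.List.pyRange 0 maxLen 1).foldl (fun d i => d.insert i []) PySem.Dict.empty
  -- for i in range(maxLen): for state in worldsRelation: if len(worldsRelation[state]) == i: order[i].append(state)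
  let order :=
    (PySem.List.pyRange 0 maxLen 1).foldl (fun d i =>
      worldsRelation.foldl (fun d kv =>
        if (((PySem.Dict.mk worldsRelation).getD kv.1 []).length : Int) == i
        then d.modify i [] (fun b => b ++ [kv.1]) else d) d) order
  order.items

-- ===== PORT B =====
def wordlsRelationToOrder_alt (worldsRelation : List (String × List String)) : List (Int × List String) :=
  -- maxLen = max(map(len, worldsRelation.values()), default=0)
  let maxLen : Int :=
    (PySem.List.max? (worldsRelation.map (fun kv => (kv.2.length : Int))) (fun x => x)).getD 0
  -- buckets = [[] for _ in range(maxLen)]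
  let buckets : List (List String) :=
    (PySem.List.pyRange 0 maxLen 1).map (fun _ => ([] : List String))
  -- for state, rel in worldsRelation.items(): if len(rel) < maxLen: buckets[len(rel)].append(state)
  let buckets := worldsRelation.foldl (fun bs kv =>
      if (kv.2.length : Int) < maxLen
      then bs.modify kv.2.length (fun b => b ++ [kv.1]) else bs) buckets
  -- return dict(enumerate(buckets))
  (PySem.Dict.mk (PySem.List.enumerate buckets 0)).items

-- ===== PRECONDITION & SPEC =====
-- Pre_ excludes association lists with duplicate keys, which do not encode any Python dict
-- (the function's argument is a dict, so Python A is never called on such an input).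
def Pre_wordlsRelationToOrder (worldsRelation : List (String × List String)) : Prop :=
  (worldsRelation.map Prod.fst).Nodup
instance (worldsRelation : List (String × List String)) : Decidable (Pre_wordlsRelationToOrder worldsRelation) := by unfold Pre_wordlsRelationToOrder; infer_instance

def pvWitness_wordlsRelationToOrder : (List (String × List String)) :=
  [("a", ["x"]), ("b", []), ("c", ["x", "y"])]

def Spec_wordlsRelationToOrder (worldsRelation : List (String × List String)) (out : List (Int × List String)) : Prop := out = wordlsRelationToOrder_alt worldsRelation
instance (worldsRelation : List (String × List String)) (out : List (Int × List String)) : Decidable (Spec_wordlsRelationToOrder worldsRelation out) := by unfold Spec_wordlsRelationToOrder; infer_instance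

-- ===== CLAIM (what is proved, stated in full; the proofs are below) =====
def Claim_equal_wordlsRelationToOrder : Prop := ∀ (worldsRelation : List (String × List String)), Dom_wordlsRelationToOrder worldsRelation → Pre_wordlsRelationToOrder worldsRelation → Spec_wordlsRelationToOrder worldsRelation (wordlsRelationToOrder worldsRelation)


-- ===== LEMMAS AND PROOFS =====

-- with distinct keys, dict lookup on the backing list returns the pair's own value
theorem pv_lookup_self (wr : List (String × List String))
    (hnd : (wr.map Prod.fst).Nodup) :
    ∀ kv ∈ wr, (PySem.Dict.mk wr).getD kv.1 [] = kv.2 := by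
  intro kv hmem
  exact PySem.Dict.getD_of_mem_items (PySem.Dict.mk wr) hmem hnd []

-- A's running max of looked-up lengths equals B's max?-with-default over the values
theorem pv_maxLen_eq (wr : List (String × List String))
    (hnd : (wr.map Prod.fst).Nodup) :
    (PySem.List.max? (wr.map (fun kv => (kv.2.length : Int))) (fun x => x)).getD 0
      = wr.foldl (fun m kv => max m (((PySem.Dict.mk wr).getD kv.1 []).length : Int)) 0 := by
  have hcongr : wr.foldl (fun m kv => max m (((PySem.Dict.mk wr).getD kv.1 []).length : Int)) 0
      = wr.foldl (fun m kv => max m ((kv.2.length : Int))) 0 := by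
    refine PySem.List.foldl_congr_mem wr _ _ 0 ?_
    intro acc kv hmem
    rw [pv_lookup_self wr hnd kv hmem]
  rw [hcongr]
  cases wr with
  | nil => simp [PySem.List.max?]
  | cons kv t =>
      simp only [List.map_cons, PySem.List.max?_id_cons, Option.getD_some, List.foldl_cons]
      rw [List.foldl_map]
      have h0 : max 0 ((kv.2.length : Int)) = (kv.2.length : Int) :=
        max_eq_right (Int.natCast_nonneg _)
      rw [h0]

-- the running max starting from 0 is nonnegative
theorem pv_foldl_max_init (wr l : List (String × List String)) :
    ∀ (a : Int), a ≤ l.foldl (fun m kv => max m (((PySem.Dict.mk wr).getD kv.1 []).length : Int)) a := by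
  induction l with
  | nil => intro a; exact le_refl a
  | cons kv t ih => intro a; exact le_trans (le_max_left _ _) (ih _)

theorem pv_maxLen_nonneg (wr : List (String × List String)) :
    0 ≤ wr.foldl (fun m kv => max m (((PySem.Dict.mk wr).getD kv.1 []).length : Int)) 0 :=
  pv_foldl_max_init wr wr 0

-- getD after the bucket-initialisation fold is always []
theorem pv_getD_init : ∀ (l : List Int) (d : PySem.Dict Int (List String)),
    (∀ c, d.getD c [] = []) →
    ∀ c, (l.foldl (fun d i => d.insert i ([] : List String)) d).getD c [] = [] := by
  intro l
  induction l with
  | nil => intro d h c; simpa using h c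
  | cons i t ih =>
      intro d h c
      simp only [List.foldl_cons]
      refine ih _ ?_ c
      intro c'
      rw [PySem.Dict.getD_insert]
      split
      · rfl
      · exact h c'

-- keys after the bucket-initialisation fold from the empty dict
theorem pv_keys_init (n : Int) :
    ((PySem.List.pyRange 0 n 1).foldl (fun d i => d.insert i ([] : List String))
        PySem.Dict.empty).keys = PySem.List.pyRange 0 n 1 := by
  have h := PySem.Dict.items_foldl_insert_fresh (PySem.List.pyRange 0 n 1)
      (fun i => i) (fun _ => ([] : List String)) PySem.Dict.empty
      (by intro a _; exact PySem.Dict.contains_empty a)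
      (by simpa using PySem.List.nodup_pyRange_one 0 n)
  simp only [PySem.Dict.keys, h]
  have he : (PySem.Dict.empty : PySem.Dict Int (List String)).items = [] := rfl
  simp [he, Function.comp_def]

-- modifying an existing key leaves the key list unchanged
theorem pv_keys_modify_mem (d : PySem.Dict Int (List String)) (k : Int)
    (f : List String → List String) (h : k ∈ d.keys) :
    (d.modify k [] f).keys = d.keys := by
  rw [PySem.Dict.keys_modify]
  rw [PySem.Dict.keys_insert_of_contains]
  exact (PySem.Dict.contains_iff_mem_keys d k).2 h

-- A's inner scan at a fixed index i: keys preserved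
theorem pv_keys_foldA_inner (wr : List (String × List String)) (i n : Int)
    (hi : i ∈ PySem.List.pyRange 0 n 1) :
    ∀ (l : List (String × List String)) (d : PySem.Dict Int (List String)),
    d.keys = PySem.List.pyRange 0 n 1 →
    (l.foldl (fun d kv => if (((PySem.Dict.mk wr).getD kv.1 []).length : Int) == i
        then d.modify i [] (fun b => b ++ [kv.1]) else d) d).keys
      = PySem.List.pyRange 0 n 1 := by
  intro l
  induction l with
  | nil => intro d h; simpa using h
  | cons kv t ih =>
      intro d h
      simp only [List.foldl_cons]
      by_cases hc : (((PySem.Dict.mk wr).getD kv.1 []).length : Int) == i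
      · rw [if_pos hc]
        refine ih _ ?_
        rw [pv_keys_modify_mem _ _ _ (by rw [h]; exact hi), h]
      · rw [if_neg (by simp_all)]; exact ih d h

-- A's inner scan at a fixed index i: getD appends the i-bucket to entry i only
theorem pv_getD_foldA_inner (wr : List (String × List String)) (i : Int) :
    ∀ (l : List (String × List String)) (d : PySem.Dict Int (List String)) (c : Int),
    (l.foldl (fun d kv => if (((PySem.Dict.mk wr).getD kv.1 []).length : Int) == i
        then d.modify i [] (fun b => b ++ [kv.1]) else d) d).getD c []
      = d.getD c [] ++ (if c = i then (l.filter (fun kv =>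
          (((PySem.Dict.mk wr).getD kv.1 []).length : Int) == i)).map (fun kv => kv.1) else []) := by
  intro l
  induction l with
  | nil => intro d c; simp
  | cons kv t ih =>
      intro d c
      simp only [List.foldl_cons]
      rw [ih]
      by_cases hc : (((PySem.Dict.mk wr).getD kv.1 []).length : Int) == i
      · rw [if_pos hc, PySem.Dict.getD_modify]
        simp only [List.filter_cons, hc, if_true, List.map_cons]
        by_cases hci : c = i
        · rw [if_pos hci, if_pos hci, if_pos hci, List.append_assoc]
          subst hci; rfl
        · rw [if_neg hci, if_neg hci, if_neg hci]
      · rw [if_neg (by simp_all)]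
        simp only [List.filter_cons]
        rw [if_neg hc]

-- A's outer loop over a duplicate-free index list
theorem pv_getD_foldA_outer (wr : List (String × List String)) :
    ∀ (r : List Int), r.Nodup →
    ∀ (d : PySem.Dict Int (List String)) (c : Int),
    (r.foldl (fun d i => wr.foldl (fun d kv =>
        if (((PySem.Dict.mk wr).getD kv.1 []).length : Int) == i
        then d.modify i [] (fun b => b ++ [kv.1]) else d) d) d).getD c []
      = d.getD c [] ++ (if c ∈ r then (wr.filter (fun kv =>
          (((PySem.Dict.mk wr).getD kv.1 []).length : Int) == c)).map (fun kv => kv.1) else []) := by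
  intro r
  induction r with
  | nil => intro _ d c; simp
  | cons i t ih =>
      intro hnd d c
      simp only [List.foldl_cons]
      rw [ih hnd.of_cons]
      rw [pv_getD_foldA_inner]
      by_cases hci : c = i
      · subst hci
        have hnotmem : c ∉ t := by
          intro hmem; exact (List.nodup_cons.1 hnd).1 hmem
        simp [hnotmem]
      · rw [if_neg hci, List.append_nil]
        by_cases hct : c ∈ t
        · simp [hct, List.mem_cons, hci]
        · simp [hct, List.mem_cons, hci]

-- A's outer loop: keys preserved
theorem pv_keys_foldA_outer (wr : List (String × List String)) (n : Int) :
    ∀ (r : List Int), (∀ i ∈ r, i ∈ PySem.List.pyRange 0 n 1) →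
    ∀ (d : PySem.Dict Int (List String)), d.keys = PySem.List.pyRange 0 n 1 →
    (r.foldl (fun d i => wr.foldl (fun d kv =>
        if (((PySem.Dict.mk wr).getD kv.1 []).length : Int) == i
        then d.modify i [] (fun b => b ++ [kv.1]) else d) d) d).keys
      = PySem.List.pyRange 0 n 1 := by
  intro r
  induction r with
  | nil => intro _ d h; simpa using h
  | cons i t ih =>
      intro hr d h
      simp only [List.foldl_cons]
      refine ih (fun j hj => hr j (List.mem_cons_of_mem _ hj)) _ ?_
      exact pv_keys_foldA_inner wr i n (hr i (List.mem_cons_self ..)) wr d h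

-- B's bucket fold preserves the length of the bucket list
theorem pv_len_foldB (n : Int) : ∀ (l : List (String × List String)) (bs : List (List String)),
    (l.foldl (fun bs kv => if (kv.2.length : Int) < n
        then bs.modify kv.2.length (fun b => b ++ [kv.1]) else bs) bs).length = bs.length := by
  intro l
  induction l with
  | nil => intro bs; rfl
  | cons kv t ih =>
      intro bs
      simp only [List.foldl_cons]
      by_cases hlt : (kv.2.length : Int) < n
      · rw [if_pos hlt, ih, List.length_modify]
      · rw [if_neg hlt, ih]

-- B's bucket fold: bucket k accumulates exactly the matching states, in order
theorem pv_get_foldB (n : Int) : ∀ (l : List (String × List String))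
    (bs : List (List String)) (k : Nat),
    (l.foldl (fun bs kv => if (kv.2.length : Int) < n
        then bs.modify kv.2.length (fun b => b ++ [kv.1]) else bs) bs)[k]?
      = bs[k]?.map (fun b => b ++ (l.filter (fun kv =>
          (kv.2.length == k) && decide ((kv.2.length : Int) < n))).map (fun kv => kv.1)) := by
  intro l
  induction l with
  | nil =>
      intro bs k
      cases h : bs[k]? <;> simp [h]
  | cons kv t ih =>
      intro bs k
      simp only [List.foldl_cons]
      by_cases hlt : (kv.2.length : Int) < n
      · rw [if_pos hlt, ih, List.getElem?_modify]
        simp only [List.filter_cons]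
        by_cases hk : kv.2.length = k
        · subst hk
          rw [if_pos (by simp [hlt])]
          cases h : bs[kv.2.length]? <;> simp [List.append_assoc]
        · rw [if_neg (by simp [hk])]
          cases h : bs[k]? <;> simp [hk]
      · rw [if_neg hlt, ih]
        simp only [List.filter_cons]
        rw [if_neg (by simp [hlt])]


-- ===== VERDICT (by name: the statement is the Claim_ definition above) =====
theorem wordlsRelationToOrder_spec : Claim_equal_wordlsRelationToOrder := by
  intro wr hdom hpre
  unfold Spec_wordlsRelationToOrder
  simp only [wordlsRelationToOrder, wordlsRelationToOrder_alt]
  rw [pv_maxLen_eq wr hpre]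
  set n := wr.foldl (fun m kv => max m (((PySem.Dict.mk wr).getD kv.1 []).length : Int)) 0 with hn
  have hn0 : 0 ≤ n := pv_maxLen_nonneg wr
  -- A-side normal form
  set d0 := (PySem.List.pyRange 0 n 1).foldl (fun d i => d.insert i ([] : List String))
      PySem.Dict.empty with hd0
  have hd0keys : d0.keys = PySem.List.pyRange 0 n 1 := pv_keys_init n
  have hd0getD : ∀ c, d0.getD c [] = [] :=
    pv_getD_init (PySem.List.pyRange 0 n 1) PySem.Dict.empty
      (fun c => PySem.Dict.getD_empty c [])
  have hkA := pv_keys_foldA_outer wr n (PySem.List.pyRange 0 n 1) (fun i hi => hi) d0 hd0keys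
  rw [PySem.Dict.items_eq_map_keys _ (by rw [hkA]; exact PySem.List.nodup_pyRange_one 0 n) [],
      hkA]
  -- B-side normal form
  set bs0 := (PySem.List.pyRange 0 n 1).map (fun _ => ([] : List String)) with hbs0
  set bsf := wr.foldl (fun bs kv => if (kv.2.length : Int) < n
      then bs.modify kv.2.length (fun b => b ++ [kv.1]) else bs) bs0 with hbsf
  have hlenf : bsf.length = n.toNat := by
    rw [hbsf, pv_len_foldB, hbs0, List.length_map, PySem.List.length_pyRange_one]
    omega
  rw [PySem.List.enumerate_eq_map_pyRange bsf ([] : List String)]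
  have hlenInt : PySem.List.len bsf = n := by
    simp [PySem.List.len, hlenf]; omega
  rw [hlenInt]
  -- compare entrywise over the common index range
  refine List.map_congr_left ?_
  intro c hc
  have hcc := (PySem.List.mem_pyRange_one).1 hc
  -- A's entry
  rw [pv_getD_foldA_outer wr (PySem.List.pyRange 0 n 1) (PySem.List.nodup_pyRange_one 0 n) d0 c,
      hd0getD c]
  simp only [List.nil_append, if_pos hc]
  -- B's entry
  have hclt : c.toNat < bsf.length := by rw [hlenf]; omega
  have hget : PySem.List.pyGetD bsf c [] = bsf[c.toNat] := by
    refine PySem.List.pyGetD_eq_getElem bsf [] hcc.1 ?_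
    rw [hlenf]; omega
  have hsome : bsf[c.toNat]? = some (([] : List String) ++ (wr.filter (fun kv =>
      (kv.2.length == c.toNat) && decide ((kv.2.length : Int) < n))).map (fun kv => kv.1)) := by
    rw [hbsf, pv_get_foldB]
    have h0 : bs0[c.toNat]? = some ([] : List String) := by
      rw [hbs0]
      rw [List.getElem?_map]
      have hlt' : c.toNat < (PySem.List.pyRange 0 n 1).length := by
        rw [PySem.List.length_pyRange_one]; omega
      obtain ⟨y, hy⟩ : ∃ y, (PySem.List.pyRange 0 n 1)[c.toNat]? = some y :=
        ⟨_, List.getElem?_eq_getElem hlt'⟩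
      rw [hy]; rfl
    rw [h0]; rfl
  have hval : bsf[c.toNat] = (wr.filter (fun kv =>
      (kv.2.length == c.toNat) && decide ((kv.2.length : Int) < n))).map (fun kv => kv.1) := by
    have := List.getElem?_eq_getElem hclt
    rw [this] at hsome
    simpa using hsome
  rw [hget, hval]
  -- the two filters agree: lookup = own value, and len == c < n collapses the guard
  refine congrArg _ (congrArg _ ?_)
  refine List.filter_congr ?_
  intro kv hkv
  rw [pv_lookup_self wr hpre kv hkv]
  by_cases hlc : (kv.2.length : Int) = c
  · have h0 : ((kv.2.length : Int) == c) = true := beq_iff_eq.mpr hlc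
    have h1 : (kv.2.length == c.toNat) = true := by rw [beq_iff_eq]; omega
    have h2 : decide ((kv.2.length : Int) < n) = true := by rw [decide_eq_true_iff]; omega
    rw [h0, h1, h2]; rfl
  · have h0 : ((kv.2.length : Int) == c) = false := by rw [beq_eq_false_iff_ne]; exact hlc
    have h1 : (kv.2.length == c.toNat) = false := by rw [beq_eq_false_iff_ne]; omega
    rw [h0, h1, Bool.false_and]
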